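-- pv_equiv track=rewrite | github.com/varshinivij/PantheonOS | pantheon/toolsets/todo/core.py | _get_auto_execution_code
-- ===== SOURCE A (Python) =====
-- def _get_auto_execution_code(content: str) -> str:
--     """Generate intelligent auto-execution code based on task content"""
--     content_lower = content.lower()
--     words = content_lower.split()
--
--     # Return suggestion message instead of hardcoded execution
--     # Let the AI system decide what to execute based on the task
--     execution_suggestions = []
--
--     # Detect task type and suggest appropriate tools
--     if any(word in words for word in ['import', 'load', 'create', 'generate']) and any(word in words for word in ['data', 'dataset']):
--         execution_suggestions.append("SUGGESTED_TOOL: run_python - for data loading/creation")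
--
--     if any(word in words for word in ['plot', 'figure', 'visualize', 'chart', 'graph']):
--         execution_suggestions.append("SUGGESTED_TOOL: run_python - matplotlib/seaborn for plotting")
--
--     if any(word in words for word in ['search', 'find']) and any(word in words for word in ['file', 'files']):
--         execution_suggestions.append("SUGGESTED_TOOL: grep or glob - for file searching")
--
--     if any(word in words for word in ['list', 'show']) and any(word in words for word in ['directory', 'folder', 'files']):
--         execution_suggestions.append("SUGGESTED_TOOL: ls - for directory listing")
--
--     if any(word in words for word in ['fetch', 'get', 'download']) and any(word in words for word in ['web', 'url', 'website']):
--         execution_suggestions.append("SUGGESTED_TOOL: web_fetch - for web content")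
--
--     if any(word in words for word in ['seurat', 'scanpy', 'single-cell']):
--         execution_suggestions.append("SUGGESTED_TOOL: run_r - for single-cell analysis")
--
--     # Return as instruction rather than hardcoded execution
--     if execution_suggestions:
--         return f"TASK_ANALYSIS: {' | '.join(execution_suggestions)}\nACTION_NEEDED: Use appropriate tool to accomplish this task"
--
--     return ""
-- ===== SOURCE B (Python) =====
-- # Inverted-index re-implementation: instead of scanning rule keywords against the
-- # word list, index keyword -> (rule, group) once and make a single pass over the
-- # input words collecting which groups were hit; a rule fires when all its groups
-- # were hit. Same output for every input.
--
-- _KEYWORD_INDEX = {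
--     'import': [(0, 0)], 'load': [(0, 0)], 'create': [(0, 0)], 'generate': [(0, 0)],
--     'data': [(0, 1)], 'dataset': [(0, 1)],
--     'plot': [(1, 0)], 'figure': [(1, 0)], 'visualize': [(1, 0)],
--     'chart': [(1, 0)], 'graph': [(1, 0)],
--     'search': [(2, 0)], 'find': [(2, 0)],
--     'file': [(2, 1)], 'files': [(2, 1), (3, 1)],
--     'list': [(3, 0)], 'show': [(3, 0)],
--     'directory': [(3, 1)], 'folder': [(3, 1)],
--     'fetch': [(4, 0)], 'get': [(4, 0)], 'download': [(4, 0)],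
--     'web': [(4, 1)], 'url': [(4, 1)], 'website': [(4, 1)],
--     'seurat': [(5, 0)], 'scanpy': [(5, 0)], 'single-cell': [(5, 0)],
-- }
--
-- _SUGGESTIONS = [  # (number of keyword groups, suggestion), in output order
--     (2, "SUGGESTED_TOOL: run_python - for data loading/creation"),
--     (1, "SUGGESTED_TOOL: run_python - matplotlib/seaborn for plotting"),
--     (2, "SUGGESTED_TOOL: grep or glob - for file searching"),
--     (2, "SUGGESTED_TOOL: ls - for directory listing"),
--     (2, "SUGGESTED_TOOL: web_fetch - for web content"),
--     (1, "SUGGESTED_TOOL: run_r - for single-cell analysis"),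
-- ]
--
--
-- def _get_auto_execution_code(content: str) -> str:
--     hits = set()
--     for w in content.lower().split():
--         hits.update(_KEYWORD_INDEX.get(w, []))
--     suggestions = [s for i, (ngroups, s) in enumerate(_SUGGESTIONS)
--                    if all((i, j) in hits for j in range(ngroups))]
--     if suggestions:
--         return (f"TASK_ANALYSIS: {' | '.join(suggestions)}"
--                 "\nACTION_NEEDED: Use appropriate tool to accomplish this task")
--     return ""
-- ===== Notes on version B (the rewrite author's own statement) =====
-- stated objective: alternative
-- what changed: Replaced A's six per-rule keyword scans over the word list by an inverted keyword->(rule,group) index with a single pass over the input words that collects hit groups into a set, then emits the suggestions whose groups are all hit.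
import Mathlib
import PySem

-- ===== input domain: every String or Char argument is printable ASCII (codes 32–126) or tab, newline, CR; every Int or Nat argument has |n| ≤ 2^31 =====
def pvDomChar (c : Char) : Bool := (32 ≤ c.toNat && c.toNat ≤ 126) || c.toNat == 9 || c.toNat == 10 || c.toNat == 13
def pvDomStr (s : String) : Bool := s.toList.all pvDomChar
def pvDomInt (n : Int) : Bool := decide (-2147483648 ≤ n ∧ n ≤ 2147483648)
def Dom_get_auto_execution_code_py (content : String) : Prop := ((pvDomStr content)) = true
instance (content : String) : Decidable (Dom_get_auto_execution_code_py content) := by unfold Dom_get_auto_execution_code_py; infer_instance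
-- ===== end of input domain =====

-- B replaces A's six per-rule keyword scans by an inverted keyword→(rule,group) index:
-- one pass over the input words collects the hit groups into a set, then the rules whose
-- groups are all hit are emitted in order; same return value for every input (alternative).


-- ===== PORT A =====
def get_auto_execution_code_py (content : String) : String :=
  let content_lower := PySem.Str.lower content
  let words := PySem.Str.split₀ content_lower
  let s0 : List String := []
  let s1 := if (["import", "load", "create", "generate"].any (fun w => words.contains w)) &&
               (["data", "dataset"].any (fun w => words.contains w))
            then s0 ++ ["SUGGESTED_TOOL: run_python - for data loading/creation"] else s0
  let s2 := if ["plot", "figure", "visualize", "chart", "graph"].any (fun w => words.contains w)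
            then s1 ++ ["SUGGESTED_TOOL: run_python - matplotlib/seaborn for plotting"] else s1
  let s3 := if (["search", "find"].any (fun w => words.contains w)) &&
               (["file", "files"].any (fun w => words.contains w))
            then s2 ++ ["SUGGESTED_TOOL: grep or glob - for file searching"] else s2
  let s4 := if (["list", "show"].any (fun w => words.contains w)) &&
               (["directory", "folder", "files"].any (fun w => words.contains w))
            then s3 ++ ["SUGGESTED_TOOL: ls - for directory listing"] else s3
  let s5 := if (["fetch", "get", "download"].any (fun w => words.contains w)) &&
               (["web", "url", "website"].any (fun w => words.contains w))
            then s4 ++ ["SUGGESTED_TOOL: web_fetch - for web content"] else s4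
  let s6 := if ["seurat", "scanpy", "single-cell"].any (fun w => words.contains w)
            then s5 ++ ["SUGGESTED_TOOL: run_r - for single-cell analysis"] else s5
  if s6 ≠ [] then
    "TASK_ANALYSIS: " ++ PySem.Str.join " | " s6 ++
      "\nACTION_NEEDED: Use appropriate tool to accomplish this task"
  else ""

-- ===== PORT B =====
-- the inverted index _KEYWORD_INDEX from Source B: keyword → list of (rule, group) it hits
def pvIndex : PySem.Dict String (List (Int × Int)) := PySem.Dict.ofList [
  ("import", [(0, 0)]), ("load", [(0, 0)]), ("create", [(0, 0)]), ("generate", [(0, 0)]),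
  ("data", [(0, 1)]), ("dataset", [(0, 1)]),
  ("plot", [(1, 0)]), ("figure", [(1, 0)]), ("visualize", [(1, 0)]),
  ("chart", [(1, 0)]), ("graph", [(1, 0)]),
  ("search", [(2, 0)]), ("find", [(2, 0)]),
  ("file", [(2, 1)]), ("files", [(2, 1), (3, 1)]),
  ("list", [(3, 0)]), ("show", [(3, 0)]),
  ("directory", [(3, 1)]), ("folder", [(3, 1)]),
  ("fetch", [(4, 0)]), ("get", [(4, 0)]), ("download", [(4, 0)]),
  ("web", [(4, 1)]), ("url", [(4, 1)]), ("website", [(4, 1)]),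
  ("seurat", [(5, 0)]), ("scanpy", [(5, 0)]), ("single-cell", [(5, 0)])]

-- _SUGGESTIONS from Source B: (number of keyword groups, suggestion), in output order
def pvSuggestions : List (Int × String) := [
  (2, "SUGGESTED_TOOL: run_python - for data loading/creation"),
  (1, "SUGGESTED_TOOL: run_python - matplotlib/seaborn for plotting"),
  (2, "SUGGESTED_TOOL: grep or glob - for file searching"),
  (2, "SUGGESTED_TOOL: ls - for directory listing"),
  (2, "SUGGESTED_TOOL: web_fetch - for web content"),
  (1, "SUGGESTED_TOOL: run_r - for single-cell analysis")]

def get_auto_execution_code_py_alt (content : String) : String :=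
  let words := PySem.Str.split₀ (PySem.Str.lower content)
  let hits : PySem.Set (Int × Int) :=
    words.foldl (fun s w => PySem.Set.update s (pvIndex.getD w [])) PySem.Set.empty
  let suggestions :=
    ((PySem.List.enumerate pvSuggestions).filter
        (fun p => (PySem.List.pyRange 0 p.2.1 1).all (fun j => PySem.Set.contains hits (p.1, j)))).map
      (fun p => p.2.2)
  if suggestions ≠ [] then
    "TASK_ANALYSIS: " ++ PySem.Str.join " | " suggestions ++
      "\nACTION_NEEDED: Use appropriate tool to accomplish this task"
  else ""

-- ===== PRECONDITION & SPEC =====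
def Spec_get_auto_execution_code_py (content : String) (out : String) : Prop := out = get_auto_execution_code_py_alt content
instance (content : String) (out : String) : Decidable (Spec_get_auto_execution_code_py content out) := by unfold Spec_get_auto_execution_code_py; infer_instance

-- ===== CLAIM (what is proved, stated in full; the proofs are below) =====
def Claim_equal_get_auto_execution_code_py : Prop := ∀ (content : String), Dom_get_auto_execution_code_py content → Spec_get_auto_execution_code_py content (get_auto_execution_code_py content)

-- ===== LEMMAS AND PROOFS =====

-- pvIndex lookup, spelled out as an if-chain over its 28 keys
set_option maxRecDepth 8192 in
lemma pv_getD_idx (w : String) : pvIndex.getD w [] =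
    (if w = "import" then [((0:Int), (0:Int))] else if w = "load" then [(0, 0)]
     else if w = "create" then [(0, 0)] else if w = "generate" then [(0, 0)]
     else if w = "data" then [(0, 1)] else if w = "dataset" then [(0, 1)]
     else if w = "plot" then [(1, 0)] else if w = "figure" then [(1, 0)]
     else if w = "visualize" then [(1, 0)] else if w = "chart" then [(1, 0)]
     else if w = "graph" then [(1, 0)] else if w = "search" then [(2, 0)]
     else if w = "find" then [(2, 0)] else if w = "file" then [(2, 1)]
     else if w = "files" then [(2, 1), (3, 1)] else if w = "list" then [(3, 0)]
     else if w = "show" then [(3, 0)] else if w = "directory" then [(3, 1)]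
     else if w = "folder" then [(3, 1)] else if w = "fetch" then [(4, 0)]
     else if w = "get" then [(4, 0)] else if w = "download" then [(4, 0)]
     else if w = "web" then [(4, 1)] else if w = "url" then [(4, 1)]
     else if w = "website" then [(4, 1)] else if w = "seurat" then [(5, 0)]
     else if w = "scanpy" then [(5, 0)] else if w = "single-cell" then [(5, 0)]
     else []) := by
  by_cases h1 : w = "import"; · subst h1; decide
  by_cases h2 : w = "load"; · subst h2; decide
  by_cases h3 : w = "create"; · subst h3; decide
  by_cases h4 : w = "generate"; · subst h4; decide
  by_cases h5 : w = "data"; · subst h5; decide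
  by_cases h6 : w = "dataset"; · subst h6; decide
  by_cases h7 : w = "plot"; · subst h7; decide
  by_cases h8 : w = "figure"; · subst h8; decide
  by_cases h9 : w = "visualize"; · subst h9; decide
  by_cases h10 : w = "chart"; · subst h10; decide
  by_cases h11 : w = "graph"; · subst h11; decide
  by_cases h12 : w = "search"; · subst h12; decide
  by_cases h13 : w = "find"; · subst h13; decide
  by_cases h14 : w = "file"; · subst h14; decide
  by_cases h15 : w = "files"; · subst h15; decide
  by_cases h16 : w = "list"; · subst h16; decide
  by_cases h17 : w = "show"; · subst h17; decide
  by_cases h18 : w = "directory"; · subst h18; decide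
  by_cases h19 : w = "folder"; · subst h19; decide
  by_cases h20 : w = "fetch"; · subst h20; decide
  by_cases h21 : w = "get"; · subst h21; decide
  by_cases h22 : w = "download"; · subst h22; decide
  by_cases h23 : w = "web"; · subst h23; decide
  by_cases h24 : w = "url"; · subst h24; decide
  by_cases h25 : w = "website"; · subst h25; decide
  by_cases h26 : w = "seurat"; · subst h26; decide
  by_cases h27 : w = "scanpy"; · subst h27; decide
  by_cases h28 : w = "single-cell"; · subst h28; decide
  have hn : List.find? (fun p => p.1 == w) pvIndex.items = none := by
    rw [List.find?_eq_none]
    have hitems : pvIndex.items = [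
      ("import", [((0:Int), (0:Int))]), ("load", [(0, 0)]), ("create", [(0, 0)]), ("generate", [(0, 0)]),
      ("data", [(0, 1)]), ("dataset", [(0, 1)]),
      ("plot", [(1, 0)]), ("figure", [(1, 0)]), ("visualize", [(1, 0)]),
      ("chart", [(1, 0)]), ("graph", [(1, 0)]),
      ("search", [(2, 0)]), ("find", [(2, 0)]),
      ("file", [(2, 1)]), ("files", [(2, 1), (3, 1)]),
      ("list", [(3, 0)]), ("show", [(3, 0)]),
      ("directory", [(3, 1)]), ("folder", [(3, 1)]),
      ("fetch", [(4, 0)]), ("get", [(4, 0)]), ("download", [(4, 0)]),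
      ("web", [(4, 1)]), ("url", [(4, 1)]), ("website", [(4, 1)]),
      ("seurat", [(5, 0)]), ("scanpy", [(5, 0)]), ("single-cell", [(5, 0)])] := by decide
    simp only [hitems, List.mem_cons, List.not_mem_nil, or_false]
    rintro x (rfl|rfl|rfl|rfl|rfl|rfl|rfl|rfl|rfl|rfl|rfl|rfl|rfl|rfl|rfl|rfl|rfl|rfl|rfl|rfl|rfl|rfl|rfl|rfl|rfl|rfl|rfl|rfl) <;>
      simp only [beq_iff_eq] <;>
      first | exact fun hc => h1 hc.symm | exact fun hc => h2 hc.symm | exact fun hc => h3 hc.symm | exact fun hc => h4 hc.symm | exact fun hc => h5 hc.symm | exact fun hc => h6 hc.symm | exact fun hc => h7 hc.symm | exact fun hc => h8 hc.symm | exact fun hc => h9 hc.symm | exact fun hc => h10 hc.symm | exact fun hc => h11 hc.symm | exact fun hc => h12 hc.symm | exact fun hc => h13 hc.symm | exact fun hc => h14 hc.symm | exact fun hc => h15 hc.symm | exact fun hc => h16 hc.symm | exact fun hc => h17 hc.symm | exact fun hc => h18 hc.symm | exact fun hc => h19 hc.symm | exact fun hc => h20 hc.symm | exact fun hc => h21 hc.symm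 | exact fun hc => h22 hc.symm | exact fun hc => h23 hc.symm | exact fun hc => h24 hc.symm | exact fun hc => h25 hc.symm | exact fun hc => h26 hc.symm | exact fun hc => h27 hc.symm | exact fun hc => h28 hc.symm
  rw [if_neg h1, if_neg h2, if_neg h3, if_neg h4, if_neg h5, if_neg h6, if_neg h7, if_neg h8, if_neg h9, if_neg h10, if_neg h11, if_neg h12, if_neg h13, if_neg h14, if_neg h15, if_neg h16, if_neg h17, if_neg h18, if_neg h19, if_neg h20, if_neg h21, if_neg h22, if_neg h23, if_neg h24, if_neg h25, if_neg h26, if_neg h27, if_neg h28]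
  simp [PySem.Dict.getD, PySem.Dict.get?, hn]

-- membership in the hit set accumulated by B's single pass over the words
lemma pv_mem_fold (ws : List String) (s : PySem.Set (Int × Int)) (p : Int × Int) :
    p ∈ ws.foldl (fun s w => PySem.Set.update s (pvIndex.getD w [])) s ↔
      p ∈ s ∨ ∃ w ∈ ws, p ∈ pvIndex.getD w [] := by
  induction ws generalizing s with
  | nil => simp
  | cons x xs ih =>
      simp only [List.foldl_cons, ih, PySem.Set.mem_update, List.mem_cons]
      aesop

-- B's "group (i,j) was hit" test equals A's "some keyword of the group is among the words"
lemma pv_hits_eq (ws : List String) (p : Int × Int) (gl : List String)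
    (hg : ∀ w : String, ((pvIndex.getD w []).contains p) = gl.contains w) :
    PySem.Set.contains (ws.foldl (fun s w => PySem.Set.update s (pvIndex.getD w [])) PySem.Set.empty) p
      = gl.any (fun k => ws.contains k) := by
  have h1 : ∀ w : String, p ∈ pvIndex.getD w [] ↔ w ∈ gl := by
    intro w
    have := hg w
    simp only [List.contains_eq_mem, decide_eq_decide] at this
    exact this
  rw [Bool.eq_iff_iff]
  simp only [PySem.Set.contains, List.contains_eq_mem, pv_mem_fold, h1,
             List.any_eq_true, decide_eq_true_eq, PySem.Set.empty, List.not_mem_nil, false_or]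
  tauto

-- each group's hit test, instantiated from the index
lemma pv_g0 (w : String) : (pvIndex.getD w []).contains ((0:Int), (0:Int)) = (["import", "load", "create", "generate"].contains w) := by
  rw [pv_getD_idx]
  by_cases h1 : w = "import"
  · subst h1; decide
  rw [if_neg h1]
  by_cases h2 : w = "load"
  · subst h2; decide
  rw [if_neg h2]
  by_cases h3 : w = "create"
  · subst h3; decide
  rw [if_neg h3]
  by_cases h4 : w = "generate"
  · subst h4; decide
  rw [if_neg h4]
  by_cases h5 : w = "data"
  · subst h5; decide
  rw [if_neg h5]
  by_cases h6 : w = "dataset"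
  · subst h6; decide
  rw [if_neg h6]
  by_cases h7 : w = "plot"
  · subst h7; decide
  rw [if_neg h7]
  by_cases h8 : w = "figure"
  · subst h8; decide
  rw [if_neg h8]
  by_cases h9 : w = "visualize"
  · subst h9; decide
  rw [if_neg h9]
  by_cases h10 : w = "chart"
  · subst h10; decide
  rw [if_neg h10]
  by_cases h11 : w = "graph"
  · subst h11; decide
  rw [if_neg h11]
  by_cases h12 : w = "search"
  · subst h12; decide
  rw [if_neg h12]
  by_cases h13 : w = "find"
  · subst h13; decide
  rw [if_neg h13]
  by_cases h14 : w = "file"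
  · subst h14; decide
  rw [if_neg h14]
  by_cases h15 : w = "files"
  · subst h15; decide
  rw [if_neg h15]
  by_cases h16 : w = "list"
  · subst h16; decide
  rw [if_neg h16]
  by_cases h17 : w = "show"
  · subst h17; decide
  rw [if_neg h17]
  by_cases h18 : w = "directory"
  · subst h18; decide
  rw [if_neg h18]
  by_cases h19 : w = "folder"
  · subst h19; decide
  rw [if_neg h19]
  by_cases h20 : w = "fetch"
  · subst h20; decide
  rw [if_neg h20]
  by_cases h21 : w = "get"
  · subst h21; decide
  rw [if_neg h21]
  by_cases h22 : w = "download"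
  · subst h22; decide
  rw [if_neg h22]
  by_cases h23 : w = "web"
  · subst h23; decide
  rw [if_neg h23]
  by_cases h24 : w = "url"
  · subst h24; decide
  rw [if_neg h24]
  by_cases h25 : w = "website"
  · subst h25; decide
  rw [if_neg h25]
  by_cases h26 : w = "seurat"
  · subst h26; decide
  rw [if_neg h26]
  by_cases h27 : w = "scanpy"
  · subst h27; decide
  rw [if_neg h27]
  by_cases h28 : w = "single-cell"
  · subst h28; decide
  rw [if_neg h28]
  simp [h1, h2, h3, h4]

lemma pv_g1 (w : String) : (pvIndex.getD w []).contains ((0:Int), (1:Int)) = (["data", "dataset"].contains w) := by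
  rw [pv_getD_idx]
  by_cases h1 : w = "import"
  · subst h1; decide
  rw [if_neg h1]
  by_cases h2 : w = "load"
  · subst h2; decide
  rw [if_neg h2]
  by_cases h3 : w = "create"
  · subst h3; decide
  rw [if_neg h3]
  by_cases h4 : w = "generate"
  · subst h4; decide
  rw [if_neg h4]
  by_cases h5 : w = "data"
  · subst h5; decide
  rw [if_neg h5]
  by_cases h6 : w = "dataset"
  · subst h6; decide
  rw [if_neg h6]
  by_cases h7 : w = "plot"
  · subst h7; decide
  rw [if_neg h7]
  by_cases h8 : w = "figure"
  · subst h8; decide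
  rw [if_neg h8]
  by_cases h9 : w = "visualize"
  · subst h9; decide
  rw [if_neg h9]
  by_cases h10 : w = "chart"
  · subst h10; decide
  rw [if_neg h10]
  by_cases h11 : w = "graph"
  · subst h11; decide
  rw [if_neg h11]
  by_cases h12 : w = "search"
  · subst h12; decide
  rw [if_neg h12]
  by_cases h13 : w = "find"
  · subst h13; decide
  rw [if_neg h13]
  by_cases h14 : w = "file"
  · subst h14; decide
  rw [if_neg h14]
  by_cases h15 : w = "files"
  · subst h15; decide
  rw [if_neg h15]
  by_cases h16 : w = "list"
  · subst h16; decide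
  rw [if_neg h16]
  by_cases h17 : w = "show"
  · subst h17; decide
  rw [if_neg h17]
  by_cases h18 : w = "directory"
  · subst h18; decide
  rw [if_neg h18]
  by_cases h19 : w = "folder"
  · subst h19; decide
  rw [if_neg h19]
  by_cases h20 : w = "fetch"
  · subst h20; decide
  rw [if_neg h20]
  by_cases h21 : w = "get"
  · subst h21; decide
  rw [if_neg h21]
  by_cases h22 : w = "download"
  · subst h22; decide
  rw [if_neg h22]
  by_cases h23 : w = "web"
  · subst h23; decide
  rw [if_neg h23]
  by_cases h24 : w = "url"
  · subst h24; decide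
  rw [if_neg h24]
  by_cases h25 : w = "website"
  · subst h25; decide
  rw [if_neg h25]
  by_cases h26 : w = "seurat"
  · subst h26; decide
  rw [if_neg h26]
  by_cases h27 : w = "scanpy"
  · subst h27; decide
  rw [if_neg h27]
  by_cases h28 : w = "single-cell"
  · subst h28; decide
  rw [if_neg h28]
  simp [h5, h6]

lemma pv_g2 (w : String) : (pvIndex.getD w []).contains ((1:Int), (0:Int)) = (["plot", "figure", "visualize", "chart", "graph"].contains w) := by
  rw [pv_getD_idx]
  by_cases h1 : w = "import"
  · subst h1; decide
  rw [if_neg h1]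
  by_cases h2 : w = "load"
  · subst h2; decide
  rw [if_neg h2]
  by_cases h3 : w = "create"
  · subst h3; decide
  rw [if_neg h3]
  by_cases h4 : w = "generate"
  · subst h4; decide
  rw [if_neg h4]
  by_cases h5 : w = "data"
  · subst h5; decide
  rw [if_neg h5]
  by_cases h6 : w = "dataset"
  · subst h6; decide
  rw [if_neg h6]
  by_cases h7 : w = "plot"
  · subst h7; decide
  rw [if_neg h7]
  by_cases h8 : w = "figure"
  · subst h8; decide
  rw [if_neg h8]
  by_cases h9 : w = "visualize"
  · subst h9; decide
  rw [if_neg h9]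
  by_cases h10 : w = "chart"
  · subst h10; decide
  rw [if_neg h10]
  by_cases h11 : w = "graph"
  · subst h11; decide
  rw [if_neg h11]
  by_cases h12 : w = "search"
  · subst h12; decide
  rw [if_neg h12]
  by_cases h13 : w = "find"
  · subst h13; decide
  rw [if_neg h13]
  by_cases h14 : w = "file"
  · subst h14; decide
  rw [if_neg h14]
  by_cases h15 : w = "files"
  · subst h15; decide
  rw [if_neg h15]
  by_cases h16 : w = "list"
  · subst h16; decide
  rw [if_neg h16]
  by_cases h17 : w = "show"
  · subst h17; decide
  rw [if_neg h17]
  by_cases h18 : w = "directory"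
  · subst h18; decide
  rw [if_neg h18]
  by_cases h19 : w = "folder"
  · subst h19; decide
  rw [if_neg h19]
  by_cases h20 : w = "fetch"
  · subst h20; decide
  rw [if_neg h20]
  by_cases h21 : w = "get"
  · subst h21; decide
  rw [if_neg h21]
  by_cases h22 : w = "download"
  · subst h22; decide
  rw [if_neg h22]
  by_cases h23 : w = "web"
  · subst h23; decide
  rw [if_neg h23]
  by_cases h24 : w = "url"
  · subst h24; decide
  rw [if_neg h24]
  by_cases h25 : w = "website"
  · subst h25; decide
  rw [if_neg h25]
  by_cases h26 : w = "seurat"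
  · subst h26; decide
  rw [if_neg h26]
  by_cases h27 : w = "scanpy"
  · subst h27; decide
  rw [if_neg h27]
  by_cases h28 : w = "single-cell"
  · subst h28; decide
  rw [if_neg h28]
  simp [h7, h8, h9, h10, h11]

lemma pv_g3 (w : String) : (pvIndex.getD w []).contains ((2:Int), (0:Int)) = (["search", "find"].contains w) := by
  rw [pv_getD_idx]
  by_cases h1 : w = "import"
  · subst h1; decide
  rw [if_neg h1]
  by_cases h2 : w = "load"
  · subst h2; decide
  rw [if_neg h2]
  by_cases h3 : w = "create"
  · subst h3; decide
  rw [if_neg h3]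
  by_cases h4 : w = "generate"
  · subst h4; decide
  rw [if_neg h4]
  by_cases h5 : w = "data"
  · subst h5; decide
  rw [if_neg h5]
  by_cases h6 : w = "dataset"
  · subst h6; decide
  rw [if_neg h6]
  by_cases h7 : w = "plot"
  · subst h7; decide
  rw [if_neg h7]
  by_cases h8 : w = "figure"
  · subst h8; decide
  rw [if_neg h8]
  by_cases h9 : w = "visualize"
  · subst h9; decide
  rw [if_neg h9]
  by_cases h10 : w = "chart"
  · subst h10; decide
  rw [if_neg h10]
  by_cases h11 : w = "graph"
  · subst h11; decide
  rw [if_neg h11]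
  by_cases h12 : w = "search"
  · subst h12; decide
  rw [if_neg h12]
  by_cases h13 : w = "find"
  · subst h13; decide
  rw [if_neg h13]
  by_cases h14 : w = "file"
  · subst h14; decide
  rw [if_neg h14]
  by_cases h15 : w = "files"
  · subst h15; decide
  rw [if_neg h15]
  by_cases h16 : w = "list"
  · subst h16; decide
  rw [if_neg h16]
  by_cases h17 : w = "show"
  · subst h17; decide
  rw [if_neg h17]
  by_cases h18 : w = "directory"
  · subst h18; decide
  rw [if_neg h18]
  by_cases h19 : w = "folder"
  · subst h19; decide
  rw [if_neg h19]
  by_cases h20 : w = "fetch"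
  · subst h20; decide
  rw [if_neg h20]
  by_cases h21 : w = "get"
  · subst h21; decide
  rw [if_neg h21]
  by_cases h22 : w = "download"
  · subst h22; decide
  rw [if_neg h22]
  by_cases h23 : w = "web"
  · subst h23; decide
  rw [if_neg h23]
  by_cases h24 : w = "url"
  · subst h24; decide
  rw [if_neg h24]
  by_cases h25 : w = "website"
  · subst h25; decide
  rw [if_neg h25]
  by_cases h26 : w = "seurat"
  · subst h26; decide
  rw [if_neg h26]
  by_cases h27 : w = "scanpy"
  · subst h27; decide
  rw [if_neg h27]
  by_cases h28 : w = "single-cell"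
  · subst h28; decide
  rw [if_neg h28]
  simp [h12, h13]

lemma pv_g4 (w : String) : (pvIndex.getD w []).contains ((2:Int), (1:Int)) = (["file", "files"].contains w) := by
  rw [pv_getD_idx]
  by_cases h1 : w = "import"
  · subst h1; decide
  rw [if_neg h1]
  by_cases h2 : w = "load"
  · subst h2; decide
  rw [if_neg h2]
  by_cases h3 : w = "create"
  · subst h3; decide
  rw [if_neg h3]
  by_cases h4 : w = "generate"
  · subst h4; decide
  rw [if_neg h4]
  by_cases h5 : w = "data"
  · subst h5; decide
  rw [if_neg h5]
  by_cases h6 : w = "dataset"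
  · subst h6; decide
  rw [if_neg h6]
  by_cases h7 : w = "plot"
  · subst h7; decide
  rw [if_neg h7]
  by_cases h8 : w = "figure"
  · subst h8; decide
  rw [if_neg h8]
  by_cases h9 : w = "visualize"
  · subst h9; decide
  rw [if_neg h9]
  by_cases h10 : w = "chart"
  · subst h10; decide
  rw [if_neg h10]
  by_cases h11 : w = "graph"
  · subst h11; decide
  rw [if_neg h11]
  by_cases h12 : w = "search"
  · subst h12; decide
  rw [if_neg h12]
  by_cases h13 : w = "find"
  · subst h13; decide
  rw [if_neg h13]
  by_cases h14 : w = "file"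
  · subst h14; decide
  rw [if_neg h14]
  by_cases h15 : w = "files"
  · subst h15; decide
  rw [if_neg h15]
  by_cases h16 : w = "list"
  · subst h16; decide
  rw [if_neg h16]
  by_cases h17 : w = "show"
  · subst h17; decide
  rw [if_neg h17]
  by_cases h18 : w = "directory"
  · subst h18; decide
  rw [if_neg h18]
  by_cases h19 : w = "folder"
  · subst h19; decide
  rw [if_neg h19]
  by_cases h20 : w = "fetch"
  · subst h20; decide
  rw [if_neg h20]
  by_cases h21 : w = "get"
  · subst h21; decide
  rw [if_neg h21]
  by_cases h22 : w = "download"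
  · subst h22; decide
  rw [if_neg h22]
  by_cases h23 : w = "web"
  · subst h23; decide
  rw [if_neg h23]
  by_cases h24 : w = "url"
  · subst h24; decide
  rw [if_neg h24]
  by_cases h25 : w = "website"
  · subst h25; decide
  rw [if_neg h25]
  by_cases h26 : w = "seurat"
  · subst h26; decide
  rw [if_neg h26]
  by_cases h27 : w = "scanpy"
  · subst h27; decide
  rw [if_neg h27]
  by_cases h28 : w = "single-cell"
  · subst h28; decide
  rw [if_neg h28]
  simp [h14, h15]

lemma pv_g5 (w : String) : (pvIndex.getD w []).contains ((3:Int), (0:Int)) = (["list", "show"].contains w) := by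
  rw [pv_getD_idx]
  by_cases h1 : w = "import"
  · subst h1; decide
  rw [if_neg h1]
  by_cases h2 : w = "load"
  · subst h2; decide
  rw [if_neg h2]
  by_cases h3 : w = "create"
  · subst h3; decide
  rw [if_neg h3]
  by_cases h4 : w = "generate"
  · subst h4; decide
  rw [if_neg h4]
  by_cases h5 : w = "data"
  · subst h5; decide
  rw [if_neg h5]
  by_cases h6 : w = "dataset"
  · subst h6; decide
  rw [if_neg h6]
  by_cases h7 : w = "plot"
  · subst h7; decide
  rw [if_neg h7]
  by_cases h8 : w = "figure"
  · subst h8; decide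
  rw [if_neg h8]
  by_cases h9 : w = "visualize"
  · subst h9; decide
  rw [if_neg h9]
  by_cases h10 : w = "chart"
  · subst h10; decide
  rw [if_neg h10]
  by_cases h11 : w = "graph"
  · subst h11; decide
  rw [if_neg h11]
  by_cases h12 : w = "search"
  · subst h12; decide
  rw [if_neg h12]
  by_cases h13 : w = "find"
  · subst h13; decide
  rw [if_neg h13]
  by_cases h14 : w = "file"
  · subst h14; decide
  rw [if_neg h14]
  by_cases h15 : w = "files"
  · subst h15; decide
  rw [if_neg h15]
  by_cases h16 : w = "list"
  · subst h16; decide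
  rw [if_neg h16]
  by_cases h17 : w = "show"
  · subst h17; decide
  rw [if_neg h17]
  by_cases h18 : w = "directory"
  · subst h18; decide
  rw [if_neg h18]
  by_cases h19 : w = "folder"
  · subst h19; decide
  rw [if_neg h19]
  by_cases h20 : w = "fetch"
  · subst h20; decide
  rw [if_neg h20]
  by_cases h21 : w = "get"
  · subst h21; decide
  rw [if_neg h21]
  by_cases h22 : w = "download"
  · subst h22; decide
  rw [if_neg h22]
  by_cases h23 : w = "web"
  · subst h23; decide
  rw [if_neg h23]
  by_cases h24 : w = "url"
  · subst h24; decide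
  rw [if_neg h24]
  by_cases h25 : w = "website"
  · subst h25; decide
  rw [if_neg h25]
  by_cases h26 : w = "seurat"
  · subst h26; decide
  rw [if_neg h26]
  by_cases h27 : w = "scanpy"
  · subst h27; decide
  rw [if_neg h27]
  by_cases h28 : w = "single-cell"
  · subst h28; decide
  rw [if_neg h28]
  simp [h16, h17]

lemma pv_g6 (w : String) : (pvIndex.getD w []).contains ((3:Int), (1:Int)) = (["directory", "folder", "files"].contains w) := by
  rw [pv_getD_idx]
  by_cases h1 : w = "import"
  · subst h1; decide
  rw [if_neg h1]
  by_cases h2 : w = "load"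
  · subst h2; decide
  rw [if_neg h2]
  by_cases h3 : w = "create"
  · subst h3; decide
  rw [if_neg h3]
  by_cases h4 : w = "generate"
  · subst h4; decide
  rw [if_neg h4]
  by_cases h5 : w = "data"
  · subst h5; decide
  rw [if_neg h5]
  by_cases h6 : w = "dataset"
  · subst h6; decide
  rw [if_neg h6]
  by_cases h7 : w = "plot"
  · subst h7; decide
  rw [if_neg h7]
  by_cases h8 : w = "figure"
  · subst h8; decide
  rw [if_neg h8]
  by_cases h9 : w = "visualize"
  · subst h9; decide
  rw [if_neg h9]
  by_cases h10 : w = "chart"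
  · subst h10; decide
  rw [if_neg h10]
  by_cases h11 : w = "graph"
  · subst h11; decide
  rw [if_neg h11]
  by_cases h12 : w = "search"
  · subst h12; decide
  rw [if_neg h12]
  by_cases h13 : w = "find"
  · subst h13; decide
  rw [if_neg h13]
  by_cases h14 : w = "file"
  · subst h14; decide
  rw [if_neg h14]
  by_cases h15 : w = "files"
  · subst h15; decide
  rw [if_neg h15]
  by_cases h16 : w = "list"
  · subst h16; decide
  rw [if_neg h16]
  by_cases h17 : w = "show"
  · subst h17; decide
  rw [if_neg h17]
  by_cases h18 : w = "directory"
  · subst h18; decide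
  rw [if_neg h18]
  by_cases h19 : w = "folder"
  · subst h19; decide
  rw [if_neg h19]
  by_cases h20 : w = "fetch"
  · subst h20; decide
  rw [if_neg h20]
  by_cases h21 : w = "get"
  · subst h21; decide
  rw [if_neg h21]
  by_cases h22 : w = "download"
  · subst h22; decide
  rw [if_neg h22]
  by_cases h23 : w = "web"
  · subst h23; decide
  rw [if_neg h23]
  by_cases h24 : w = "url"
  · subst h24; decide
  rw [if_neg h24]
  by_cases h25 : w = "website"
  · subst h25; decide
  rw [if_neg h25]
  by_cases h26 : w = "seurat"
  · subst h26; decide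
  rw [if_neg h26]
  by_cases h27 : w = "scanpy"
  · subst h27; decide
  rw [if_neg h27]
  by_cases h28 : w = "single-cell"
  · subst h28; decide
  rw [if_neg h28]
  simp [h18, h19, h15]

lemma pv_g7 (w : String) : (pvIndex.getD w []).contains ((4:Int), (0:Int)) = (["fetch", "get", "download"].contains w) := by
  rw [pv_getD_idx]
  by_cases h1 : w = "import"
  · subst h1; decide
  rw [if_neg h1]
  by_cases h2 : w = "load"
  · subst h2; decide
  rw [if_neg h2]
  by_cases h3 : w = "create"
  · subst h3; decide
  rw [if_neg h3]
  by_cases h4 : w = "generate"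
  · subst h4; decide
  rw [if_neg h4]
  by_cases h5 : w = "data"
  · subst h5; decide
  rw [if_neg h5]
  by_cases h6 : w = "dataset"
  · subst h6; decide
  rw [if_neg h6]
  by_cases h7 : w = "plot"
  · subst h7; decide
  rw [if_neg h7]
  by_cases h8 : w = "figure"
  · subst h8; decide
  rw [if_neg h8]
  by_cases h9 : w = "visualize"
  · subst h9; decide
  rw [if_neg h9]
  by_cases h10 : w = "chart"
  · subst h10; decide
  rw [if_neg h10]
  by_cases h11 : w = "graph"
  · subst h11; decide
  rw [if_neg h11]
  by_cases h12 : w = "search"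
  · subst h12; decide
  rw [if_neg h12]
  by_cases h13 : w = "find"
  · subst h13; decide
  rw [if_neg h13]
  by_cases h14 : w = "file"
  · subst h14; decide
  rw [if_neg h14]
  by_cases h15 : w = "files"
  · subst h15; decide
  rw [if_neg h15]
  by_cases h16 : w = "list"
  · subst h16; decide
  rw [if_neg h16]
  by_cases h17 : w = "show"
  · subst h17; decide
  rw [if_neg h17]
  by_cases h18 : w = "directory"
  · subst h18; decide
  rw [if_neg h18]
  by_cases h19 : w = "folder"
  · subst h19; decide
  rw [if_neg h19]
  by_cases h20 : w = "fetch"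
  · subst h20; decide
  rw [if_neg h20]
  by_cases h21 : w = "get"
  · subst h21; decide
  rw [if_neg h21]
  by_cases h22 : w = "download"
  · subst h22; decide
  rw [if_neg h22]
  by_cases h23 : w = "web"
  · subst h23; decide
  rw [if_neg h23]
  by_cases h24 : w = "url"
  · subst h24; decide
  rw [if_neg h24]
  by_cases h25 : w = "website"
  · subst h25; decide
  rw [if_neg h25]
  by_cases h26 : w = "seurat"
  · subst h26; decide
  rw [if_neg h26]
  by_cases h27 : w = "scanpy"
  · subst h27; decide
  rw [if_neg h27]
  by_cases h28 : w = "single-cell"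
  · subst h28; decide
  rw [if_neg h28]
  simp [h20, h21, h22]

lemma pv_g8 (w : String) : (pvIndex.getD w []).contains ((4:Int), (1:Int)) = (["web", "url", "website"].contains w) := by
  rw [pv_getD_idx]
  by_cases h1 : w = "import"
  · subst h1; decide
  rw [if_neg h1]
  by_cases h2 : w = "load"
  · subst h2; decide
  rw [if_neg h2]
  by_cases h3 : w = "create"
  · subst h3; decide
  rw [if_neg h3]
  by_cases h4 : w = "generate"
  · subst h4; decide
  rw [if_neg h4]
  by_cases h5 : w = "data"
  · subst h5; decide
  rw [if_neg h5]
  by_cases h6 : w = "dataset"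
  · subst h6; decide
  rw [if_neg h6]
  by_cases h7 : w = "plot"
  · subst h7; decide
  rw [if_neg h7]
  by_cases h8 : w = "figure"
  · subst h8; decide
  rw [if_neg h8]
  by_cases h9 : w = "visualize"
  · subst h9; decide
  rw [if_neg h9]
  by_cases h10 : w = "chart"
  · subst h10; decide
  rw [if_neg h10]
  by_cases h11 : w = "graph"
  · subst h11; decide
  rw [if_neg h11]
  by_cases h12 : w = "search"
  · subst h12; decide
  rw [if_neg h12]
  by_cases h13 : w = "find"
  · subst h13; decide
  rw [if_neg h13]
  by_cases h14 : w = "file"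
  · subst h14; decide
  rw [if_neg h14]
  by_cases h15 : w = "files"
  · subst h15; decide
  rw [if_neg h15]
  by_cases h16 : w = "list"
  · subst h16; decide
  rw [if_neg h16]
  by_cases h17 : w = "show"
  · subst h17; decide
  rw [if_neg h17]
  by_cases h18 : w = "directory"
  · subst h18; decide
  rw [if_neg h18]
  by_cases h19 : w = "folder"
  · subst h19; decide
  rw [if_neg h19]
  by_cases h20 : w = "fetch"
  · subst h20; decide
  rw [if_neg h20]
  by_cases h21 : w = "get"
  · subst h21; decide
  rw [if_neg h21]
  by_cases h22 : w = "download"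
  · subst h22; decide
  rw [if_neg h22]
  by_cases h23 : w = "web"
  · subst h23; decide
  rw [if_neg h23]
  by_cases h24 : w = "url"
  · subst h24; decide
  rw [if_neg h24]
  by_cases h25 : w = "website"
  · subst h25; decide
  rw [if_neg h25]
  by_cases h26 : w = "seurat"
  · subst h26; decide
  rw [if_neg h26]
  by_cases h27 : w = "scanpy"
  · subst h27; decide
  rw [if_neg h27]
  by_cases h28 : w = "single-cell"
  · subst h28; decide
  rw [if_neg h28]
  simp [h23, h24, h25]

lemma pv_g9 (w : String) : (pvIndex.getD w []).contains ((5:Int), (0:Int)) = (["seurat", "scanpy", "single-cell"].contains w) := by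
  rw [pv_getD_idx]
  by_cases h1 : w = "import"
  · subst h1; decide
  rw [if_neg h1]
  by_cases h2 : w = "load"
  · subst h2; decide
  rw [if_neg h2]
  by_cases h3 : w = "create"
  · subst h3; decide
  rw [if_neg h3]
  by_cases h4 : w = "generate"
  · subst h4; decide
  rw [if_neg h4]
  by_cases h5 : w = "data"
  · subst h5; decide
  rw [if_neg h5]
  by_cases h6 : w = "dataset"
  · subst h6; decide
  rw [if_neg h6]
  by_cases h7 : w = "plot"
  · subst h7; decide
  rw [if_neg h7]
  by_cases h8 : w = "figure"
  · subst h8; decide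
  rw [if_neg h8]
  by_cases h9 : w = "visualize"
  · subst h9; decide
  rw [if_neg h9]
  by_cases h10 : w = "chart"
  · subst h10; decide
  rw [if_neg h10]
  by_cases h11 : w = "graph"
  · subst h11; decide
  rw [if_neg h11]
  by_cases h12 : w = "search"
  · subst h12; decide
  rw [if_neg h12]
  by_cases h13 : w = "find"
  · subst h13; decide
  rw [if_neg h13]
  by_cases h14 : w = "file"
  · subst h14; decide
  rw [if_neg h14]
  by_cases h15 : w = "files"
  · subst h15; decide
  rw [if_neg h15]
  by_cases h16 : w = "list"
  · subst h16; decide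
  rw [if_neg h16]
  by_cases h17 : w = "show"
  · subst h17; decide
  rw [if_neg h17]
  by_cases h18 : w = "directory"
  · subst h18; decide
  rw [if_neg h18]
  by_cases h19 : w = "folder"
  · subst h19; decide
  rw [if_neg h19]
  by_cases h20 : w = "fetch"
  · subst h20; decide
  rw [if_neg h20]
  by_cases h21 : w = "get"
  · subst h21; decide
  rw [if_neg h21]
  by_cases h22 : w = "download"
  · subst h22; decide
  rw [if_neg h22]
  by_cases h23 : w = "web"
  · subst h23; decide
  rw [if_neg h23]
  by_cases h24 : w = "url"
  · subst h24; decide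
  rw [if_neg h24]
  by_cases h25 : w = "website"
  · subst h25; decide
  rw [if_neg h25]
  by_cases h26 : w = "seurat"
  · subst h26; decide
  rw [if_neg h26]
  by_cases h27 : w = "scanpy"
  · subst h27; decide
  rw [if_neg h27]
  by_cases h28 : w = "single-cell"
  · subst h28; decide
  rw [if_neg h28]
  simp [h26, h27, h28]

-- ===== VERDICT (by name: the statement is the Claim_ definition above) =====
set_option maxHeartbeats 4000000 in
theorem get_auto_execution_code_py_spec : Claim_equal_get_auto_execution_code_py := by
  intro content _
  unfold Spec_get_auto_execution_code_py get_auto_execution_code_py get_auto_execution_code_py_alt pvSuggestions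
  simp only [PySem.List.enumerate_cons, PySem.List.enumerate_nil, List.filter_cons, List.filter_nil,
             show PySem.List.pyRange 0 2 1 = [0, 1] from by decide,
             show PySem.List.pyRange 0 1 1 = [0] from by decide,
             List.all_cons, List.all_nil, Bool.and_true, Int.reduceAdd]
  generalize hws : (PySem.Str.split₀ (PySem.Str.lower content)) = ws
  rw [pv_hits_eq ws (0, 0) ["import", "load", "create", "generate"] pv_g0,
      pv_hits_eq ws (0, 1) ["data", "dataset"] pv_g1,
      pv_hits_eq ws (1, 0) ["plot", "figure", "visualize", "chart", "graph"] pv_g2,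
      pv_hits_eq ws (2, 0) ["search", "find"] pv_g3,
      pv_hits_eq ws (2, 1) ["file", "files"] pv_g4,
      pv_hits_eq ws (3, 0) ["list", "show"] pv_g5,
      pv_hits_eq ws (3, 1) ["directory", "folder", "files"] pv_g6,
      pv_hits_eq ws (4, 0) ["fetch", "get", "download"] pv_g7,
      pv_hits_eq ws (4, 1) ["web", "url", "website"] pv_g8,
      pv_hits_eq ws (5, 0) ["seurat", "scanpy", "single-cell"] pv_g9]
  generalize (List.any ["import", "load", "create", "generate"] (fun w => ws.contains w) &&
              List.any ["data", "dataset"] (fun w => ws.contains w)) = c1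
  generalize (List.any ["plot", "figure", "visualize", "chart", "graph"] (fun w => ws.contains w)) = c2
  generalize (List.any ["search", "find"] (fun w => ws.contains w) &&
              List.any ["file", "files"] (fun w => ws.contains w)) = c3
  generalize (List.any ["list", "show"] (fun w => ws.contains w) &&
              List.any ["directory", "folder", "files"] (fun w => ws.contains w)) = c4
  generalize (List.any ["fetch", "get", "download"] (fun w => ws.contains w) &&
              List.any ["web", "url", "website"] (fun w => ws.contains w)) = c5
  generalize (List.any ["seurat", "scanpy", "single-cell"] (fun w => ws.contains w)) = c6
  cases c1 <;> cases c2 <;> cases c3 <;> cases c4 <;> cases c5 <;> cases c6 <;> rfl
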